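-- pv_equiv track=rewrite | github.com/zois-tasoulas/algoExpert | medium/validStartingCity.py | validate_city
-- ===== SOURCE A (Python) =====
-- def validate_city(city, distances, fuel, mpg):
--     number_of_cities = len(distances)
--     remaining_miles = 0
--
--     for index in range(number_of_cities):
--         current_city = (
--             (index + city)
--             if index + city < number_of_cities
--             else (index + city) % number_of_cities
--         )
--         remaining_miles = (
--             remaining_miles + fuel[current_city] * mpg - distances[current_city]
--         )
--         if remaining_miles < 0:
--             return False
--
--     return True
-- ===== SOURCE B (Python) =====
-- def validate_city(city, distances, fuel, mpg):
--     n = len(distances)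
--     if n == 0:
--         return True
--     start = city % n
--     # prefix-sum table of net fuel per city, in ORIGINAL city order (no rotation)
--     prefix = [0]
--     run = 0
--     for index in range(n):
--         run = run + fuel[index] * mpg - distances[index]
--         prefix.append(run)
--     total = prefix[n]
--     base = prefix[start]
--     tail_ok = min(prefix[start + 1:]) >= base
--     wrap_ok = min(prefix[:start + 1]) + total >= base
--     return tail_ok and wrap_ok
-- ===== Notes on version B (the rewrite author's own statement) =====
-- stated objective: alternative
-- what changed: A simulates the rotated trip with an early-exit running-fuel loop over circular indices; B never simulates the trip: it builds the prefix-sum table of per-city net fuel in the ORIGINAL city order once, then decides validity by two range-minimum checks on that static table (min of the suffix after the start and min of the prefix up to the start, shifted by the lap total). …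
-- outside the precondition, e.g. on validate_city(0, [5, 1], [1], 1): A returns False, B raises IndexError; on validate_city(-1, [1, 1], [0, 0, 9], 1): A returns True, B returns False
-- crash fix: When fuel covers every city (len(fuel) >= len(distances)) but city < -len(distances), A raises IndexError on the first iteration (distances[city]); B's modular start index returns the normal round-trip answer. — e.g. on validate_city(-3, [1, 1], [1, 1], 1): A raises IndexError, B returns true
import Mathlib
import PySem

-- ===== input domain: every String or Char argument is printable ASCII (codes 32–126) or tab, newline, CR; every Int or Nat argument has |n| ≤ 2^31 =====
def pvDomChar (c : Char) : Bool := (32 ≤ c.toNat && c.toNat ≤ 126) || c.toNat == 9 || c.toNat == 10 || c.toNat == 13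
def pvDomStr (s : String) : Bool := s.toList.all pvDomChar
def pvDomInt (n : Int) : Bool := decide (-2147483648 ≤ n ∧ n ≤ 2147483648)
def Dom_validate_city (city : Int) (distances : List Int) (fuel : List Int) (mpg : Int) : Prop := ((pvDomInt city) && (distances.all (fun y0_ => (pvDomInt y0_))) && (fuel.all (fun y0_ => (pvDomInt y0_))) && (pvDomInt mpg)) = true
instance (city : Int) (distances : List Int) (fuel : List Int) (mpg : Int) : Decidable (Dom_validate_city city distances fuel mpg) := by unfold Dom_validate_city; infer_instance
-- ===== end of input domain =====

-- ===== PORT A =====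
-- B replaces A's simulation of the rotated trip by a static prefix-sum table over the
-- ORIGINAL city order plus two range-minimum checks; equivalence is about the return
-- value (no argument is mutated).
def vcLoopA (city : Int) (distances : List Int) (fuel : List Int) (mpg : Int) (n : Int) :
    List Int → Int → Bool
  | [], _ => true
  | index :: rest, rem =>
    let c := if index + city < n then index + city else PySem.Int.mod (index + city) n
    match PySem.List.pyGet? fuel c, PySem.List.pyGet? distances c with
    | some f, some d =>
      let rem' := rem + f * mpg - d
      if rem' < 0 then false else vcLoopA city distances fuel mpg n rest rem'
    | _, _ => false  -- IndexError in Python: excluded by Pre_validate_city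

def validate_city (city : Int) (distances : List Int) (fuel : List Int) (mpg : Int) : Bool :=
  vcLoopA city distances fuel mpg (distances.length : Int)
    (PySem.List.pyRange 0 (distances.length : Int) 1) 0

-- ===== PORT B =====
-- Source B's prefix-building loop over `for index in range(n)`; appends the running sum
-- (.getD 0 is never taken under Pre_: every index is in range there, as in Source B)
def vcPrefixLoop (distances : List Int) (fuel : List Int) (mpg : Int) :
    List Int → Int → List Int → List Int
  | [], _, pre => pre
  | index :: rest, run, pre =>
    let run' := run + (PySem.List.pyGet? fuel index).getD 0 * mpg
        - (PySem.List.pyGet? distances index).getD 0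
    vcPrefixLoop distances fuel mpg rest run' (pre ++ [run'])

def validate_city_alt (city : Int) (distances : List Int) (fuel : List Int) (mpg : Int) : Bool :=
  let n : Int := (distances.length : Int)
  if n = 0 then true
  else
    let start := PySem.Int.mod city n
    let pre := vcPrefixLoop distances fuel mpg (PySem.List.pyRange 0 n 1) 0 [0]
    -- prefix[n], prefix[start]: always in range (.getD 0 unreachable), as in Source B
    let total := (PySem.List.pyGet? pre n).getD 0
    let base := (PySem.List.pyGet? pre start).getD 0
    -- min() of the two slices: both slices are nonempty here, so min? is some (.getD 0 unreachable)
    let tail_ok := decide ((PySem.List.min? (PySem.List.slice pre (some (start + 1)) none) (fun y => y)).getD 0 ≥ base)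
    let wrap_ok := decide ((PySem.List.min? (PySem.List.slice pre none (some (start + 1))) (fun y => y)).getD 0 + total ≥ base)
    tail_ok && wrap_ok

-- ===== PRECONDITION & SPEC =====
-- Pre_ restricts to the natural domain of parallel arrays and in-range starts: a fuel list
-- shorter than distances raises IndexError mid-loop unless an accidental early False hides it,
-- and a negative city with a strictly longer fuel list reads accidental elements of fuel via
-- negative-index wraparound (city < -len(distances) always raises IndexError).
def Pre_validate_city (city : Int) (distances : List Int) (fuel : List Int) (mpg : Int) : Prop :=
  distances.length ≤ fuel.length ∧
    (0 ≤ city ∨ (fuel.length = distances.length ∧ -(distances.length : Int) ≤ city))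
instance (city : Int) (distances : List Int) (fuel : List Int) (mpg : Int) : Decidable (Pre_validate_city city distances fuel mpg) := by unfold Pre_validate_city; infer_instance

def pvWitness_validate_city : Int × List Int × List Int × Int := (0, [1, 2], [2, 1], 1)

-- When fuel covers every city (len(fuel) ≥ len(distances)) but city < -len(distances), A raises
-- IndexError on the first iteration (distances[city]); B's modular start returns the answer.
def Raises_validate_city (city : Int) (distances : List Int) (fuel : List Int) (mpg : Int) : Prop :=
  distances.length ≤ fuel.length ∧ 0 < distances.length ∧ city < -(distances.length : Int)
instance (city : Int) (distances : List Int) (fuel : List Int) (mpg : Int) : Decidable (Raises_validate_city city distances fuel mpg) := by unfold Raises_validate_city; infer_instance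

def pvRaiseWitness_validate_city : Int × List Int × List Int × Int := (-3, [1, 1], [1, 1], 1)
def pvRaiseWitnessOut_validate_city : Bool := true

def Spec_validate_city (city : Int) (distances : List Int) (fuel : List Int) (mpg : Int) (out : Bool) : Prop := out = validate_city_alt city distances fuel mpg
instance (city : Int) (distances : List Int) (fuel : List Int) (mpg : Int) (out : Bool) : Decidable (Spec_validate_city city distances fuel mpg out) := by unfold Spec_validate_city; infer_instance

-- ===== CLAIM (what is proved, stated in full; the proofs are below) =====
def Claim_equal_validate_city : Prop := ∀ (city : Int) (distances : List Int) (fuel : List Int) (mpg : Int), Dom_validate_city city distances fuel mpg → Pre_validate_city city distances fuel mpg → Spec_validate_city city distances fuel mpg (validate_city city distances fuel mpg)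

def Claim_raises_validate_city : Prop := (∀ (city : Int) (distances : List Int) (fuel : List Int) (mpg : Int), Dom_validate_city city distances fuel mpg → Raises_validate_city city distances fuel mpg → ¬ Pre_validate_city city distances fuel mpg) ∧ (Dom_validate_city (pvRaiseWitness_validate_city.1) (pvRaiseWitness_validate_city.2.1) (pvRaiseWitness_validate_city.2.2.1) (pvRaiseWitness_validate_city.2.2.2) ∧ Raises_validate_city (pvRaiseWitness_validate_city.1) (pvRaiseWitness_validate_city.2.1) (pvRaiseWitness_validate_city.2.2.1) (pvRaiseWitness_validate_city.2.2.2) ∧ validate_city_alt (pvRaiseWitness_validate_city.1) (pvRaiseWitness_validate_city.2.1) (pvRaiseWitness_validate_city.2.2.1) (pvRaiseWitness_validate_city.2.2.2) = pvRaiseWitnessOut_validate_city)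

-- ===== LEMMAS AND PROOFS =====

-- ---- A-side: the loop checks that every rotated prefix sum stays nonnegative ----

-- cons-step equation of A's loop when both accesses succeed
lemma vcLoopA_cons_some (city : Int) (distances fuel : List Int) (mpg n index rem fv dv : Int)
    (rest : List Int)
    (h1 : PySem.List.pyGet? fuel
        (if index + city < n then index + city else PySem.Int.mod (index + city) n) = some fv)
    (h2 : PySem.List.pyGet? distances
        (if index + city < n then index + city else PySem.Int.mod (index + city) n) = some dv) :
    vcLoopA city distances fuel mpg n (index :: rest) rem =
      if rem + fv * mpg - dv < 0 then false
      else vcLoopA city distances fuel mpg n rest (rem + fv * mpg - dv) := by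
  show (match PySem.List.pyGet? fuel
          (if index + city < n then index + city else PySem.Int.mod (index + city) n),
        PySem.List.pyGet? distances
          (if index + city < n then index + city else PySem.Int.mod (index + city) n) with
       | some f, some d =>
         if rem + f * mpg - d < 0 then false
         else vcLoopA city distances fuel mpg n rest (rem + f * mpg - d)
       | _, _ => false) = _
  rw [h1, h2]

-- abstraction of A's loop over an arbitrary list of per-step net values
def vcAllPref : Int → List Int → Bool
  | _, [] => true
  | r, v :: vs => if r + v < 0 then false else vcAllPref (r + v) vs

lemma vcAllPref_cons (r v : Int) (vs : List Int) :
    vcAllPref r (v :: vs) = if r + v < 0 then false else vcAllPref (r + v) vs := rfl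

-- net fuel of the city visited at step i of A's trip (c = (i+city) % n)
def vcNet (city : Int) (distances : List Int) (fuel : List Int) (mpg : Int) (n : Int)
    (i : Int) : Int :=
  let c := PySem.Int.mod (i + city) n
  (PySem.List.pyGet? fuel c).getD 0 * mpg - (PySem.List.pyGet? distances c).getD 0

-- under Pre_, A's branch-based circular index reads the same elements as the modular index
lemma vc_get_eq (city : Int) (distances fuel : List Int) (i : Int)
    (hlen : distances.length ≤ fuel.length)
    (hcity : 0 ≤ city ∨ (fuel.length = distances.length ∧ -(distances.length : Int) ≤ city))
    (hi0 : 0 ≤ i) (hin : i < (distances.length : Int)) :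
    (PySem.List.pyGet? fuel
        (if i + city < (distances.length : Int) then i + city
         else PySem.Int.mod (i + city) (distances.length : Int)) =
      PySem.List.pyGet? fuel (PySem.Int.mod (i + city) (distances.length : Int))) ∧
    (PySem.List.pyGet? distances
        (if i + city < (distances.length : Int) then i + city
         else PySem.Int.mod (i + city) (distances.length : Int)) =
      PySem.List.pyGet? distances (PySem.Int.mod (i + city) (distances.length : Int))) := by
  set n : Int := (distances.length : Int) with hn
  have hnpos : 0 < n := by omega
  have hmod : PySem.Int.mod (i + city) n = (i + city) % n :=
    PySem.Int.mod_eq_emod_of_pos hnpos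
  by_cases hlt : i + city < n
  · rw [if_pos hlt]
    by_cases hnn : 0 ≤ i + city
    · have : (i + city) % n = i + city := Int.emod_eq_of_lt hnn hlt
      rw [hmod, this]
      exact ⟨rfl, rfl⟩
    · rcases hcity with h0 | ⟨hfl, hc⟩
      · omega
      have hneg : i + city < 0 := by omega
      have hmodv : (i + city) % n = i + city + n := by
        have h1 : (i + city + n) % n = (i + city) % n := by
          simpa using Int.add_mul_emod_self_left (a := i + city) (b := n) (c := 1)
        have h2 : (i + city + n) % n = i + city + n :=
          Int.emod_eq_of_lt (by omega) (by omega)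
        omega
      constructor
      · rw [PySem.List.pyGet?_neg fuel hneg (by omega), hmod, hmodv,
          PySem.List.pyGet?_of_nonneg fuel (by omega)]
        congr 1
        omega
      · rw [PySem.List.pyGet?_neg distances hneg (by omega), hmod, hmodv,
          PySem.List.pyGet?_of_nonneg distances (by omega)]
        congr 1
        omega
  · rw [if_neg hlt]
    exact ⟨rfl, rfl⟩

-- A's loop over the index range equals vcAllPref over the mapped net values
set_option maxRecDepth 4096 in
lemma vc_loop_eq (city : Int) (distances fuel : List Int) (mpg : Int)
    (hlen : distances.length ≤ fuel.length)
    (hcity : 0 ≤ city ∨ (fuel.length = distances.length ∧ -(distances.length : Int) ≤ city)) :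
    ∀ (k : Nat) (a rem : Int), 0 ≤ a → a + k = (distances.length : Int) →
      vcLoopA city distances fuel mpg (distances.length : Int)
          (PySem.List.pyRange a (distances.length : Int) 1) rem =
        vcAllPref rem ((PySem.List.pyRange a (distances.length : Int) 1).map
          (vcNet city distances fuel mpg (distances.length : Int))) := by
  intro k
  induction k with
  | zero =>
    intro a rem ha hk
    rw [PySem.List.pyRange_one_eq_nil (by omega)]
    rfl
  | succ m ih =>
    intro a rem ha hk
    set n : Int := (distances.length : Int) with hn
    have hnpos : 0 < n := by omega
    have han : a < n := by omega
    rw [PySem.List.pyRange_one_cons han]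
    obtain ⟨hf, hd⟩ := vc_get_eq city distances fuel a hlen hcity ha han
    have hc0 : 0 ≤ PySem.Int.mod (a + city) n := PySem.Int.mod_nonneg _ hnpos
    have hcn : PySem.Int.mod (a + city) n < n := PySem.Int.mod_lt _ hnpos
    obtain ⟨fv, hfv⟩ : ∃ v, PySem.List.pyGet? fuel (PySem.Int.mod (a + city) n) = some v :=
      ⟨_, PySem.List.pyGet?_eq_some_getElem fuel hc0 (by omega)⟩
    obtain ⟨dv, hdv⟩ : ∃ v, PySem.List.pyGet? distances (PySem.Int.mod (a + city) n) = some v :=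
      ⟨_, PySem.List.pyGet?_eq_some_getElem distances hc0 (by omega)⟩
    rw [vcLoopA_cons_some city distances fuel mpg n a rem fv dv _ (hf.trans hfv) (hd.trans hdv),
      List.map_cons, vcAllPref_cons]
    have hnet : vcNet city distances fuel mpg n a = fv * mpg - dv := by
      simp only [vcNet, hfv, hdv, Option.getD_some]
    rw [hnet]
    have e : rem + fv * mpg - dv = rem + (fv * mpg - dv) := by ring
    rw [e]
    split_ifs with hneg
    · rfl
    · exact ih (a + 1) _ (by omega) (by omega)

-- vcAllPref decides "every prefix sum from r stays nonnegative"
lemma vcAllPref_iff (vs : List Int) : ∀ r : Int,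
    vcAllPref r vs = true ↔ ∀ k < vs.length, 0 ≤ r + ((vs.take (k + 1)).sum) := by
  induction vs with
  | nil => intro r; simp [vcAllPref]
  | cons v vs ih =>
    intro r
    rw [vcAllPref_cons]
    by_cases h : r + v < 0
    · rw [if_pos h]
      simp only [Bool.false_eq_true, false_iff, not_forall]
      refine ⟨0, ?_⟩
      simp only [List.length_cons, List.take_succ_cons, List.take_zero, List.sum_cons,
        List.sum_nil, Classical.not_imp]
      exact ⟨by omega, by omega⟩
    · rw [if_neg h, ih (r + v)]
      constructor
      · intro hall k hk
        simp only [List.take_succ_cons, List.sum_cons]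
        cases k with
        | zero => simp only [List.take_zero, List.sum_nil]; omega
        | succ k' =>
          have := hall k' (by simpa using hk)
          omega
      · intro hall k hk
        have := hall (k + 1) (by simp; omega)
        simp only [List.take_succ_cons, List.sum_cons] at this
        omega

-- ---- B-side: the prefix table and its characterisation ----

-- per-city net fuel in original order (the step of the prefix table)
def vcNetF (distances fuel : List Int) (mpg : Int) (j : Nat) : Int :=
  (PySem.List.pyGet? fuel (j : Int)).getD 0 * mpg - (PySem.List.pyGet? distances (j : Int)).getD 0

-- mathematical prefix sums of vcNetF
def vcP (distances fuel : List Int) (mpg : Int) : Nat → Int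
  | 0 => 0
  | j + 1 => vcP distances fuel mpg j + vcNetF distances fuel mpg j

@[simp] lemma vcP_zero (distances fuel : List Int) (mpg : Int) :
    vcP distances fuel mpg 0 = 0 := rfl

lemma vcP_succ (distances fuel : List Int) (mpg : Int) (j : Nat) :
    vcP distances fuel mpg (j + 1) = vcP distances fuel mpg j + vcNetF distances fuel mpg j := rfl

-- Source B's loop builds exactly the table of prefix sums
lemma vcPrefix_build (distances fuel : List Int) (mpg : Int) :
    ∀ (k a : Nat), a + k = distances.length →
      vcPrefixLoop distances fuel mpg
          (PySem.List.pyRange (a : Int) (distances.length : Int) 1)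
          (vcP distances fuel mpg a) ((List.range (a + 1)).map (vcP distances fuel mpg)) =
        (List.range (distances.length + 1)).map (vcP distances fuel mpg) := by
  intro k
  induction k with
  | zero =>
    intro a ha
    rw [PySem.List.pyRange_one_eq_nil (by exact_mod_cast le_of_eq (by omega))]
    have : a = distances.length := by omega
    rw [this]
    rfl
  | succ m ih =>
    intro a ha
    have han : (a : Int) < (distances.length : Int) := by exact_mod_cast (by omega : a < distances.length)
    rw [PySem.List.pyRange_one_cons han]
    show vcPrefixLoop distances fuel mpg (PySem.List.pyRange ((a : Int) + 1) _ 1)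
        (vcP distances fuel mpg a + (PySem.List.pyGet? fuel (a : Int)).getD 0 * mpg
          - (PySem.List.pyGet? distances (a : Int)).getD 0)
        ((List.range (a + 1)).map (vcP distances fuel mpg) ++
          [vcP distances fuel mpg a + (PySem.List.pyGet? fuel (a : Int)).getD 0 * mpg
            - (PySem.List.pyGet? distances (a : Int)).getD 0]) = _
    have hrun : vcP distances fuel mpg a + (PySem.List.pyGet? fuel (a : Int)).getD 0 * mpg
        - (PySem.List.pyGet? distances (a : Int)).getD 0 = vcP distances fuel mpg (a + 1) := by
      rw [vcP_succ, vcNetF]; ring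
    rw [hrun]
    have hlist : (List.range (a + 1)).map (vcP distances fuel mpg) ++
        [vcP distances fuel mpg (a + 1)] = (List.range (a + 1 + 1)).map (vcP distances fuel mpg) := by
      rw [List.range_succ (n := a + 1), List.map_append, List.map_cons, List.map_nil]
    rw [hlist]
    have hcast : (a : Int) + 1 = ((a + 1 : Nat) : Int) := by push_cast; ring
    rw [hcast]
    exact ih (a + 1) (by omega)

-- the instantiated build equation for Source B's actual initial state
lemma vcPrefix_build0 (distances fuel : List Int) (mpg : Int) :
    vcPrefixLoop distances fuel mpg (PySem.List.pyRange 0 (distances.length : Int) 1) 0 [0] =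
      (List.range (distances.length + 1)).map (vcP distances fuel mpg) := by
  have h := vcPrefix_build distances fuel mpg distances.length 0 (by omega)
  simpa [List.range_one] using h

-- reading an entry of the table
lemma vcPre_get (distances fuel : List Int) (mpg : Int) (k : Nat) (hk : k ≤ distances.length) :
    PySem.List.pyGet? ((List.range (distances.length + 1)).map (vcP distances fuel mpg)) (k : Int)
      = some (vcP distances fuel mpg k) := by
  rw [PySem.List.pyGet?_natCast]
  simp [List.getElem?_map, List.getElem?_range, Nat.lt_succ_of_le hk]

-- "base ≤ min(l)" means "base is ≤ every element" (nonempty l; Python min = first minimum)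
lemma vc_min_iff (l : List Int) (hl : l ≠ []) (base : Int) :
    (base ≤ (PySem.List.min? l (fun y => y)).getD 0) ↔ ∀ x ∈ l, base ≤ x := by
  obtain ⟨m, hm⟩ : ∃ m, PySem.List.min? l (fun y => y) = some m := by
    cases h : PySem.List.min? l (fun y => y) with
    | none => exact absurd ((PySem.List.min?_eq_none_iff l _).1 h) hl
    | some m => exact ⟨m, rfl⟩
  rw [hm]
  simp only [Option.getD_some]
  constructor
  · intro h x hx
    exact le_trans h (PySem.List.min?_isMin hm x hx)
  · intro h
    exact h m (PySem.List.min?_mem hm)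

-- ---- linking the two: rotated indices and rotated prefix sums ----

-- shifting by the normalised start: (i+city) % n unfolds into a single wrap test
lemma vc_mod_shift (city n i : Int) (hn : 0 < n) (hi0 : 0 ≤ i) (hin : i < n) :
    PySem.Int.mod (i + city) n =
      if i + PySem.Int.mod city n < n then i + PySem.Int.mod city n
      else i + PySem.Int.mod city n - n := by
  have hm := PySem.Int.mod_eq_emod_of_pos (a := city) hn
  have hm2 := PySem.Int.mod_eq_emod_of_pos (a := i + city) hn
  have hs0 : 0 ≤ city % n := Int.emod_nonneg city (by omega)
  have hsn : city % n < n := Int.emod_lt_of_pos city hn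
  have hdec : n * (city / n) + city % n = city := Int.ediv_add_emod city n
  have key : (i + city) % n = (i + city % n) % n := by
    have h1 : i + city = (i + city % n) + n * (city / n) := by omega
    rw [h1, Int.add_mul_emod_self_left]
  rw [hm2, hm, key]
  by_cases hlt : i + city % n < n
  · rw [if_pos hlt, Int.emod_eq_of_lt (by omega) hlt]
  · rw [if_neg hlt]
    have h2 : (i + city % n) % n = (i + city % n - n) % n := by
      have h3 : (i + city % n - n) + n * 1 = i + city % n := by ring
      conv_lhs => rw [← h3]
      rw [Int.add_mul_emod_self_left]
    rw [h2, Int.emod_eq_of_lt (by omega) (by omega)]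

-- the net at rotated step k is vcNetF at the wrapped original index
lemma vcNet_eq_netF (city : Int) (distances fuel : List Int) (mpg : Int) (k : Nat)
    (hk : k < distances.length) :
    vcNet city distances fuel mpg (distances.length : Int) (k : Int) =
      vcNetF distances fuel mpg
        (if (PySem.Int.mod city (distances.length : Int)).toNat + k < distances.length
         then (PySem.Int.mod city (distances.length : Int)).toNat + k
         else (PySem.Int.mod city (distances.length : Int)).toNat + k - distances.length) := by
  have hn : (0 : Int) < (distances.length : Int) := by exact_mod_cast Nat.zero_lt_of_lt hk
  have hs0 : 0 ≤ PySem.Int.mod city (distances.length : Int) := PySem.Int.mod_nonneg _ hn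
  have hsn : PySem.Int.mod city (distances.length : Int) < (distances.length : Int) :=
    PySem.Int.mod_lt _ hn
  have hshift := vc_mod_shift city (distances.length : Int) (k : Int) hn
    (by exact_mod_cast Nat.zero_le k) (by exact_mod_cast hk)
  have hidx : (if (k : Int) + PySem.Int.mod city (distances.length : Int) < (distances.length : Int)
        then (k : Int) + PySem.Int.mod city (distances.length : Int)
        else (k : Int) + PySem.Int.mod city (distances.length : Int) - (distances.length : Int)) =
      ((if (PySem.Int.mod city (distances.length : Int)).toNat + k < distances.length
        then (PySem.Int.mod city (distances.length : Int)).toNat + k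
        else (PySem.Int.mod city (distances.length : Int)).toNat + k - distances.length : Nat) : Int) := by
    split_ifs with h1 h2 h2 <;> push_cast <;> omega
  simp only [vcNet, vcNetF]
  rw [hshift, hidx]

-- the sum of the first m rotated nets, in terms of the prefix table
lemma vc_take_sum (city : Int) (distances fuel : List Int) (mpg : Int)
    (hn : 0 < distances.length) :
    ∀ m, m ≤ distances.length →
      (((PySem.List.pyRange 0 (distances.length : Int) 1).map
          (vcNet city distances fuel mpg (distances.length : Int))).take m).sum =
        (if (PySem.Int.mod city (distances.length : Int)).toNat + m ≤ distances.length
         then vcP distances fuel mpg ((PySem.Int.mod city (distances.length : Int)).toNat + m)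
              - vcP distances fuel mpg (PySem.Int.mod city (distances.length : Int)).toNat
         else vcP distances fuel mpg
                ((PySem.Int.mod city (distances.length : Int)).toNat + m - distances.length)
              + vcP distances fuel mpg distances.length
              - vcP distances fuel mpg (PySem.Int.mod city (distances.length : Int)).toNat) := by
  have hnI : (0 : Int) < (distances.length : Int) := by exact_mod_cast hn
  set s : Nat := (PySem.Int.mod city (distances.length : Int)).toNat with hsdef
  have hs : s < distances.length := by
    have := PySem.Int.mod_lt city hnI
    have h0 := PySem.Int.mod_nonneg city hnI
    omega
  have hsI0 : 0 ≤ PySem.Int.mod city (distances.length : Int) := PySem.Int.mod_nonneg _ hnI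
  have hsIlt : PySem.Int.mod city (distances.length : Int) < (distances.length : Int) :=
    PySem.Int.mod_lt _ hnI
  set nets : List Int := (PySem.List.pyRange 0 (distances.length : Int) 1).map
      (vcNet city distances fuel mpg (distances.length : Int)) with hnets
  have hlen : nets.length = distances.length := by
    rw [hnets, List.length_map, PySem.List.length_pyRange_one]
    omega
  intro m
  induction m with
  | zero =>
    intro _
    rw [List.take_zero, List.sum_nil, if_pos (by omega), Nat.add_zero]
    omega
  | succ m ih =>
    intro hm
    have hmn : m < distances.length := by omega
    have hmlt : m < nets.length := by omega
    have hnm : nets[m]'hmlt = vcNet city distances fuel mpg (distances.length : Int) (m : Int) := by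
      simp only [hnets, List.getElem_map, PySem.List.getElem_pyRange_one, zero_add]
    rw [List.sum_take_succ nets m hmlt, ih (by omega), hnm,
      vcNet_eq_netF city distances fuel mpg m hmn, ← hsdef]
    by_cases h1 : s + (m + 1) ≤ distances.length
    · rw [if_pos h1, if_pos (by omega), if_pos (by omega)]
      rw [show s + (m + 1) = (s + m) + 1 from by omega, vcP_succ]
      omega
    · rw [if_neg h1]
      by_cases h2 : s + m ≤ distances.length
      · -- wrap happens exactly at this step: s + m = n
        have hsm : s + m = distances.length := by omega
        rw [if_pos h2, if_neg (by omega)]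
        rw [show s + m - distances.length = 0 from by omega,
          show s + (m + 1) - distances.length = 1 from by omega,
          show (1 : Nat) = 0 + 1 from rfl, vcP_succ, hsm]
        simp only [vcP_zero]
        omega
      · rw [if_neg (by omega), if_neg (by omega)]
        rw [show s + (m + 1) - distances.length = (s + m - distances.length) + 1 from by omega,
          vcP_succ]
        omega

-- index gymnastics: nonnegative rotated prefix sums ⟺ the two range-minimum conditions
lemma vc_final_iff (P : Nat → Int) (n s : Nat) (hn : 0 < n) (hs : s < n) (hP0 : P 0 = 0) :
    (∀ k < n, 0 ≤ (if s + (k + 1) ≤ n then P (s + (k + 1)) - P s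
        else P (s + (k + 1) - n) + P n - P s)) ↔
      ((∀ j, s + 1 ≤ j → j < n + 1 → P s ≤ P j) ∧ (∀ j, j < s + 1 → P s ≤ P j + P n)) := by
  constructor
  · intro h
    constructor
    · intro j h1 h2
      have hk := h (j - s - 1) (by omega)
      rw [if_pos (by omega), show s + (j - s - 1 + 1) = j from by omega] at hk
      omega
    · intro j hj
      rcases Nat.eq_zero_or_pos j with hj0 | hjp
      · subst hj0
        have hk := h (n - s - 1) (by omega)
        rw [if_pos (by omega), show s + (n - s - 1 + 1) = n from by omega] at hk
        rw [hP0]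
        omega
      · have hk := h (n - s + j - 1) (by omega)
        rw [if_neg (by omega), show s + (n - s + j - 1 + 1) - n = j from by omega] at hk
        omega
  · rintro ⟨h1, h2⟩ k hk
    by_cases hc : s + (k + 1) ≤ n
    · rw [if_pos hc]
      have := h1 (s + (k + 1)) (by omega) (by omega)
      omega
    · rw [if_neg hc]
      have := h2 (s + (k + 1) - n) (by omega)
      omega

-- ===== VERDICT (by name: the statement is the Claim_ definition above) =====
set_option maxHeartbeats 1000000 in
theorem validate_city_spec : Claim_equal_validate_city := by
  intro city distances fuel mpg _ hpre
  obtain ⟨hlenf, hcity⟩ := hpre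
  unfold Spec_validate_city
  rcases Nat.eq_zero_or_pos distances.length with h0 | hn
  · -- empty distances: A's loop range is empty, B takes the n = 0 branch
    have hdn : distances = [] := List.eq_nil_of_length_eq_zero h0
    subst hdn
    show vcLoopA city [] fuel mpg ((0 : Nat) : Int) (PySem.List.pyRange 0 ((0 : Nat) : Int) 1) 0
        = validate_city_alt city [] fuel mpg
    rw [show (((0 : Nat) : Int)) = (0 : Int) from rfl, PySem.List.pyRange_one_eq_nil le_rfl]
    simp [validate_city_alt, vcLoopA]
  · -- main case
    have hnI : (0 : Int) < (distances.length : Int) := by exact_mod_cast hn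
    have hne : ¬ ((distances.length : Int) = 0) := by omega
    set s : Nat := (PySem.Int.mod city (distances.length : Int)).toNat with hsdef
    have hs0 : 0 ≤ PySem.Int.mod city (distances.length : Int) := PySem.Int.mod_nonneg _ hnI
    have hsI : PySem.Int.mod city (distances.length : Int) = (s : Int) := by
      rw [hsdef, Int.toNat_of_nonneg hs0]
    have hs : s < distances.length := by
      have := PySem.Int.mod_lt city hnI
      omega
    -- B's table is the prefix-sum table
    have hbuild := vcPrefix_build0 distances fuel mpg
    -- rewrite A into vcAllPref over the rotated nets
    unfold validate_city
    rw [vc_loop_eq city distances fuel mpg hlenf hcity distances.length 0 0 le_rfl (by omega)]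
    -- rewrite B, discharging the let-bound locals
    rw [Bool.eq_iff_iff]
    unfold validate_city_alt
    simp only [if_neg hne, hbuild, hsI, Bool.and_eq_true, decide_eq_true_eq, ge_iff_le]
    -- table lookups
    rw [show ((s : Int) + 1) = ((s + 1 : Nat) : Int) from by push_cast; ring]
    rw [vcPre_get distances fuel mpg distances.length le_rfl,
      vcPre_get distances fuel mpg s (by omega)]
    simp only [Option.getD_some]
    -- slices
    rw [PySem.List.slice_from_natCast, PySem.List.slice_to_natCast]
    rw [← List.map_drop, ← List.map_take]
    rw [List.range_eq_range', List.drop_range']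
    rw [← List.range_eq_range', List.take_range]
    have hmin : min (s + 1) (distances.length + 1) = s + 1 := by omega
    rw [hmin]
    -- min ⇒ ∀-characterisations
    have htail : ((vcP distances fuel mpg s ≤
        (PySem.List.min? ((List.range' (0 + (s + 1) * 1) (distances.length + 1 - (s + 1))).map
          (vcP distances fuel mpg)) (fun y => y)).getD 0)) ↔
        ∀ j, s + 1 ≤ j → j < distances.length + 1 → vcP distances fuel mpg s ≤ vcP distances fuel mpg j := by
      rw [vc_min_iff _ (by
        intro habs
        have := congrArg List.length habs
        simp only [List.length_map, List.length_range', List.length_nil] at this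
        omega)]
      simp only [List.forall_mem_map, List.mem_range']
      constructor
      · intro h j hj1 hj2
        exact h j ⟨j - s - 1, by omega, by omega⟩
      · rintro h j ⟨i, hi, rfl⟩
        exact h _ (by omega) (by omega)
    have hwrap : ((vcP distances fuel mpg s ≤
        (PySem.List.min? ((List.range (s + 1)).map (vcP distances fuel mpg)) (fun y => y)).getD 0
          + vcP distances fuel mpg distances.length)) ↔
        ∀ j, j < s + 1 → vcP distances fuel mpg s ≤ vcP distances fuel mpg j + vcP distances fuel mpg distances.length := by
      obtain ⟨m, hm⟩ : ∃ m, PySem.List.min? ((List.range (s + 1)).map (vcP distances fuel mpg))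
          (fun y => y) = some m := by
        cases h : PySem.List.min? ((List.range (s + 1)).map (vcP distances fuel mpg))
            (fun y => y) with
        | none =>
          exfalso
          have := (PySem.List.min?_eq_none_iff _ _).1 h
          have := congrArg List.length this
          simp at this
        | some m => exact ⟨m, rfl⟩
      rw [hm]
      simp only [Option.getD_some]
      constructor
      · intro h j hj
        have hmem := PySem.List.min?_isMin hm (vcP distances fuel mpg j)
          (List.mem_map_of_mem (by rw [List.mem_range]; omega))
        simp only at hmem
        omega
      · intro h
        obtain ⟨j, hjmem, hjeq⟩ := List.mem_map.1 (PySem.List.min?_mem hm)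
        rw [List.mem_range] at hjmem
        have := h j hjmem
        omega
    rw [htail, hwrap]
    -- A's side: all rotated prefix sums nonnegative
    rw [vcAllPref_iff]
    have hlen : ((PySem.List.pyRange 0 (distances.length : Int) 1).map
        (vcNet city distances fuel mpg (distances.length : Int))).length = distances.length := by
      rw [List.length_map, PySem.List.length_pyRange_one]; omega
    have hA : (∀ k < ((PySem.List.pyRange 0 (distances.length : Int) 1).map
          (vcNet city distances fuel mpg (distances.length : Int))).length,
        0 ≤ (0 : Int) + ((((PySem.List.pyRange 0 (distances.length : Int) 1).map
          (vcNet city distances fuel mpg (distances.length : Int))).take (k + 1)).sum)) ↔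
        (∀ k < distances.length, 0 ≤ (if s + (k + 1) ≤ distances.length
          then vcP distances fuel mpg (s + (k + 1)) - vcP distances fuel mpg s
          else vcP distances fuel mpg (s + (k + 1) - distances.length) + vcP distances fuel mpg distances.length - vcP distances fuel mpg s)) := by
      constructor
      · intro h k hk
        have hh := h k (by omega)
        rw [vc_take_sum city distances fuel mpg hn (k + 1) (by omega), ← hsdef] at hh
        split_ifs at hh ⊢ <;> omega
      · intro h k hk
        rw [vc_take_sum city distances fuel mpg hn (k + 1) (by omega), ← hsdef]
        have hh := h k (by omega)
        split_ifs at hh ⊢ <;> omega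
    rw [hA, vc_final_iff (vcP distances fuel mpg) distances.length s hn hs (vcP_zero distances fuel mpg)]

@[simp]
theorem validate_city_raises : Claim_raises_validate_city := by
  unfold Claim_raises_validate_city
  refine ⟨?_, by decide⟩
  intro city distances fuel mpg _ hr hpre
  obtain ⟨_, h2, h3⟩ := hr
  obtain ⟨_, hc⟩ := hpre
  rcases hc with h | ⟨_, h⟩ <;> omega
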